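-- pv_equiv track=rewrite | github.com/pypi-data/pypi-mirror-361 | packages/exfor-tools/exfor_tools-0.3.1-py3-none-any.whl/exfor_tools/distribution.py | extract_staterr_labels
-- ===== SOURCE A (Python) =====
-- def extract_staterr_labels(
--     labels,
--     allowed_sys_errs=frozenset(["ERR-SYS"]),
--     allowed_stat_errs=frozenset(["DATA-ERR", "ERR-T", "ERR-S"]),
--     expected_sys_errs=frozenset([]),
-- ):
--     """
--     Extracts statistical error labels from a list of labels.
--
--     Parameters:
--     labels (list): A list of error labels.
--     allowed_sys_errs (set): A set of allowed systematic error labels.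
--     allowed_stat_errs (set): A set of allowed statistical error labels.
--
--     Returns:
--     tuple: A tuple containing the statistical error labels and a string specifying
--     the treatment
--
--     Raises:
--     ValueError: If the statistical error labels are ambiguous
--     """
--     allowed_stat_err_combos = set(
--         [frozenset([l, "ERR-DIG"]) for l in allowed_stat_errs]
--         + [frozenset([l]) for l in allowed_stat_errs | frozenset(["ERR-DIG"])]
--     )
--     stat_err_labels = frozenset(labels) - allowed_sys_errs - expected_sys_errs
--     if len(stat_err_labels) == 0:
--         return [], "independent"
--     if stat_err_labels in allowed_stat_err_combos:
--         return list(stat_err_labels), "independent"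
--     else:
--         labels = ", ".join(labels)
--         raise ValueError(f"Ambiguous statistical error labels:\n{labels}")
-- ===== SOURCE B (Python) =====
-- def extract_staterr_labels(
--     labels,
--     allowed_sys_errs=frozenset(["ERR-SYS"]),
--     allowed_stat_errs=frozenset(["DATA-ERR", "ERR-T", "ERR-S"]),
--     expected_sys_errs=frozenset([]),
-- ):
--     """Classify the statistical error labels directly by the size of the
--     surviving label set, instead of enumerating all allowed combinations."""
--     stat = frozenset(labels) - allowed_sys_errs - expected_sys_errs
--     if len(stat) == 0:
--         return [], "independent"
--     if len(stat) == 1: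
--         (x,) = stat
--         if x in allowed_stat_errs or x == "ERR-DIG":
--             return [x], "independent"
--     if len(stat) == 2 and "ERR-DIG" in stat:
--         (y,) = stat - frozenset(["ERR-DIG"])
--         if y in allowed_stat_errs:
--             return sorted(stat), "independent"
--     raise ValueError("Ambiguous statistical error labels:\n" + ", ".join(labels))
-- ===== Notes on version B (the rewrite author's own statement) =====
-- stated objective: simpler
-- what changed: B drops the enumeration of all allowed frozenset combinations and classifies the surviving label set directly by its size (0, 1, or the ERR-DIG pair), checking membership in allowed_stat_errs; Pre_ additionally excludes the two-label return, where A's list order is frozenset hash order (B returns the same pair sorted).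
import Mathlib
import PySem

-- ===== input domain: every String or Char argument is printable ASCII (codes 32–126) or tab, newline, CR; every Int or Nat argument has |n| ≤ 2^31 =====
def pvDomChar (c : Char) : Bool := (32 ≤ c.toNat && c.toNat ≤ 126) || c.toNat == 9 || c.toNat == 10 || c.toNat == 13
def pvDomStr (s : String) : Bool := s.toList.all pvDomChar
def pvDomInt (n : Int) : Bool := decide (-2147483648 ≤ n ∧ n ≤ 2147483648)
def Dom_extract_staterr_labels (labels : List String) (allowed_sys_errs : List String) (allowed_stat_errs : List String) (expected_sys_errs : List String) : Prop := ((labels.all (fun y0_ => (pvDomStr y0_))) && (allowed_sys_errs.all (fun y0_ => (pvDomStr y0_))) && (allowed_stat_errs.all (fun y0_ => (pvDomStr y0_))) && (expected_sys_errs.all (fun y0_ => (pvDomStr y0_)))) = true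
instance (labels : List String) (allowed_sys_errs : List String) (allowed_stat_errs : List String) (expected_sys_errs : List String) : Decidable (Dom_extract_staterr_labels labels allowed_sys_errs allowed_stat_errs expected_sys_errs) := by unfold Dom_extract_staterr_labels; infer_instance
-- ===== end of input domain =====

-- B replaces A's enumerated table of allowed frozenset combinations by a direct case split on
-- the size of the surviving label set (simpler decomposition, same cost). Equivalence is about
-- the RETURN value on Pre_; on the two-label return A's list order is frozenset hash order.

-- ===== PORT A =====
-- Python's `set()` of frozensets: built element by element, a frozenset is a PySem.Set String and
-- frozenset equality is PySem.Set.equal (exact for the only use made of it, the membership test).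
def pvFsetAdd (acc : List (PySem.Set String)) (c : PySem.Set String) : List (PySem.Set String) :=
  if acc.any (fun c' => PySem.Set.equal c c') then acc else acc ++ [c]

def extract_staterr_labels (labels : List String) (allowed_sys_errs : List String) (allowed_stat_errs : List String) (expected_sys_errs : List String) : List String × String :=
  let allowed_stat_err_combos : List (PySem.Set String) :=
    ((allowed_stat_errs.map (fun l => PySem.Set.ofList [l, "ERR-DIG"])) ++
     ((PySem.Set.union (PySem.Set.ofList allowed_stat_errs) ["ERR-DIG"]).map
        (fun l => PySem.Set.ofList [l]))).foldl pvFsetAdd []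
  let stat_err_labels : PySem.Set String :=
    PySem.Set.diff (PySem.Set.diff (PySem.Set.ofList labels) allowed_sys_errs) expected_sys_errs
  if stat_err_labels.length = 0 then ([], "independent")
  else if allowed_stat_err_combos.any (fun c => PySem.Set.equal stat_err_labels c) then
    (stat_err_labels, "independent")
  else ([], "")  -- Python raises ValueError here; excluded by Pre_

-- ===== PORT B =====
def extract_staterr_labels_alt (labels : List String) (allowed_sys_errs : List String) (allowed_stat_errs : List String) (expected_sys_errs : List String) : List String × String :=
  let stat : PySem.Set String :=
    PySem.Set.diff (PySem.Set.diff (PySem.Set.ofList labels) allowed_sys_errs) expected_sys_errs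
  if stat.length = 0 then ([], "independent")
  else if stat.length = 1 && (allowed_stat_errs.contains (stat.headD "") || stat.headD "" == "ERR-DIG") then
    ([stat.headD ""], "independent")
  else if stat.length = 2 && PySem.Set.contains stat "ERR-DIG"
          && allowed_stat_errs.contains ((PySem.Set.diff stat ["ERR-DIG"]).headD "") then
    (PySem.List.sorted stat (fun x => x) false, "independent")
  else ([], "")  -- Python raises ValueError here; excluded by Pre_

-- ===== PRECONDITION & SPEC =====
-- Pre_ excludes (a) the inputs on which A raises ValueError (ambiguous labels) and (b) the inputs
-- on which the surviving label set has TWO elements (ERR-DIG plus one allowed statistical error):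
-- there A returns list(frozenset) whose element order is an accident of string hashing.
def Pre_extract_staterr_labels (labels : List String) (allowed_sys_errs : List String) (allowed_stat_errs : List String) (expected_sys_errs : List String) : Prop :=
  let stat : PySem.Set String :=
    PySem.Set.diff (PySem.Set.diff (PySem.Set.ofList labels) allowed_sys_errs) expected_sys_errs
  stat.length ≤ 1 ∧ ∀ x ∈ stat, x ∈ allowed_stat_errs ∨ x = "ERR-DIG"
instance (labels : List String) (allowed_sys_errs : List String) (allowed_stat_errs : List String) (expected_sys_errs : List String) : Decidable (Pre_extract_staterr_labels labels allowed_sys_errs allowed_stat_errs expected_sys_errs) := by unfold Pre_extract_staterr_labels; infer_instance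

def pvWitness_extract_staterr_labels : List String × List String × List String × List String :=
  (["DATA-ERR", "ERR-SYS"], ["ERR-SYS"], ["DATA-ERR", "ERR-T"], [])

def Spec_extract_staterr_labels (labels : List String) (allowed_sys_errs : List String) (allowed_stat_errs : List String) (expected_sys_errs : List String) (out : List String × String) : Prop := out = extract_staterr_labels_alt labels allowed_sys_errs allowed_stat_errs expected_sys_errs
instance (labels : List String) (allowed_sys_errs : List String) (allowed_stat_errs : List String) (expected_sys_errs : List String) (out : List String × String) : Decidable (Spec_extract_staterr_labels labels allowed_sys_errs allowed_stat_errs expected_sys_errs out) := by unfold Spec_extract_staterr_labels; infer_instance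

-- ===== CLAIM =====
def Claim_equal_extract_staterr_labels : Prop := ∀ (labels : List String) (allowed_sys_errs : List String) (allowed_stat_errs : List String) (expected_sys_errs : List String), Dom_extract_staterr_labels labels allowed_sys_errs allowed_stat_errs expected_sys_errs → Pre_extract_staterr_labels labels allowed_sys_errs allowed_stat_errs expected_sys_errs → Spec_extract_staterr_labels labels allowed_sys_errs allowed_stat_errs expected_sys_errs (extract_staterr_labels labels allowed_sys_errs allowed_stat_errs expected_sys_errs)

-- ===== LEMMAS AND PROOFS =====

-- Membership (by set-equality) in the foldl-built set of frozensets equals membership in the source list.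
lemma any_foldl_fsetAdd (s : PySem.Set String) (L : List (PySem.Set String)) (acc : List (PySem.Set String)) :
    (L.foldl pvFsetAdd acc).any (fun c => PySem.Set.equal s c)
      = (acc.any (fun c => PySem.Set.equal s c) || L.any (fun c => PySem.Set.equal s c)) := by
  induction L generalizing acc with
  | nil => simp
  | cons c L ih =>
    simp only [List.foldl_cons, List.any_cons, ih]
    unfold pvFsetAdd
    split_ifs with h
    · rcases List.any_eq_true.mp h with ⟨c', hc', hcc'⟩
      by_cases hsc : PySem.Set.equal s c = true
      · have hsc' : PySem.Set.equal s c' = true := by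
          rw [PySem.Set.equal_iff] at *
          exact fun x => (hsc x).trans (hcc' x)
        have : acc.any (fun c => PySem.Set.equal s c) = true :=
          List.any_eq_true.mpr ⟨c', hc', hsc'⟩
        simp [this, hsc]
      · simp [Bool.eq_false_iff.mpr hsc]
    · simp [List.any_append, Bool.or_assoc, Bool.or_comm (PySem.Set.equal s c)]

lemma singleton_in_combos (x : String) (allowed_stat_errs : List String)
    (hx : x ∈ allowed_stat_errs ∨ x = "ERR-DIG") :
    (((allowed_stat_errs.map (fun l => PySem.Set.ofList [l, "ERR-DIG"])) ++
      ((PySem.Set.union (PySem.Set.ofList allowed_stat_errs) ["ERR-DIG"]).map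
         (fun l => PySem.Set.ofList [l]))).foldl pvFsetAdd []).any
      (fun c => PySem.Set.equal [x] c) = true := by
  rw [any_foldl_fsetAdd]
  have hxu : x ∈ PySem.Set.union (PySem.Set.ofList allowed_stat_errs) ["ERR-DIG"] := by
    rw [PySem.Set.mem_union]
    rcases hx with h | h
    · exact Or.inl ((PySem.Set.mem_ofList _ _).mpr h)
    · simp [h]
  have hmem : PySem.Set.ofList [x] ∈
      (PySem.Set.union (PySem.Set.ofList allowed_stat_errs) ["ERR-DIG"]).map
        (fun l => PySem.Set.ofList [l]) := List.mem_map.mpr ⟨x, hxu, rfl⟩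
  have heq : PySem.Set.equal ([x] : List String) (PySem.Set.ofList [x]) = true := by
    rw [PySem.Set.equal_iff]; intro y; simp [PySem.Set.mem_ofList]
  rw [List.any_append]
  have : ((PySem.Set.union (PySem.Set.ofList allowed_stat_errs) ["ERR-DIG"]).map
      (fun l => PySem.Set.ofList [l])).any (fun c => PySem.Set.equal [x] c) = true :=
    List.any_eq_true.mpr ⟨PySem.Set.ofList [x], hmem, heq⟩
  simp [this]

-- ===== VERDICT =====
theorem extract_staterr_labels_spec : Claim_equal_extract_staterr_labels := by
  intro labels allowed_sys_errs allowed_stat_errs expected_sys_errs _ hpre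
  unfold Spec_extract_staterr_labels extract_staterr_labels extract_staterr_labels_alt
  obtain ⟨hlen, hall⟩ := hpre
  set stat := PySem.Set.diff (PySem.Set.diff (PySem.Set.ofList labels) allowed_sys_errs) expected_sys_errs with hstat
  match hS : stat with
  | [] => simp
  | [x] =>
    have hx : x ∈ allowed_stat_errs ∨ x = "ERR-DIG" := hall x (by simp)
    have hA := singleton_in_combos x allowed_stat_errs hx
    have hB : (allowed_stat_errs.contains x || x == "ERR-DIG") = true := by
      rcases hx with h | h <;> simp [h]
    simp only [List.length_cons, List.length_nil]
    rw [hA]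
    simp
    exact fun h => hx.resolve_left h
  | x :: y :: rest =>
    exfalso
    simp at hlen
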